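-- pv_equiv track=rewrite | github.com/echoid/rep_missing | genRBF/genRBF_source/RBFkernel.py | trainTestID_1
-- ===== SOURCE A (Python) =====
-- def trainTestID_1(test_id, train_id, S):
--     size_ = len(S)
--     S_test = [[] for _ in range(size_)]
--     S_train = [[] for _ in range(size_)]
--     completeDataId_test = []
--     completeDataId_train = []
--
--     size1 = len(test_id)
--     size2 = len(train_id)
--     size3 = max(size1, size2)
--
--     for i in range(size3):
--         check1 = i < size1
--         check2 = i < size2
--
--         for j in range(size_):
--             if check1 and test_id[i] in S[j]:
--                 S_test[j].append(test_id[i])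
--                 check1 = False
--             elif check2 and train_id[i] in S[j]:
--                 S_train[j].append(train_id[i])
--                 check2 = False
--             if not (check1 or check2):
--                 break
--
--         if check1:
--             completeDataId_test.append(test_id[i])
--         if check2:
--             completeDataId_train.append(train_id[i])
--
--     return (S_train, S_test, completeDataId_train, completeDataId_test)
-- ===== SOURCE B (Python) =====
-- def trainTestID_1(test_id, train_id, S):
--     # Precompute, per element, the first and second distinct bucket index containing it.
--     first = {}
--     second = {}
--     for j, bucket in enumerate(S):
--         for x in bucket:
--             if x not in first:
--                 first[x] = j
--             elif first[x] != j and x not in second: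
--                 second[x] = j
--
--     S_test = [[] for _ in S]
--     S_train = [[] for _ in S]
--     completeDataId_test = []
--     completeDataId_train = []
--
--     for i in range(max(len(test_id), len(train_id))):
--         jt = None
--         if i < len(test_id):
--             t = test_id[i]
--             jt = first.get(t)
--             if jt is None:
--                 completeDataId_test.append(t)
--             else:
--                 S_test[jt].append(t)
--         if i < len(train_id):
--             r = train_id[i]
--             jr = first.get(r)
--             if jr is not None and jr == jt:
--                 jr = second.get(r)
--             if jr is None:
--                 completeDataId_train.append(r)
--             else:
--                 S_train[jr].append(r)
--
--     return (S_train, S_test, completeDataId_train, completeDataId_test)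
-- ===== Notes on version B (the rewrite author's own statement) =====
-- stated objective: faster
-- what changed: Replaces the per-id scan over all buckets (with membership tests inside) by a one-pass precomputed dict mapping each element to its first and second distinct bucket index, so each id is assigned by O(1) lookups.
import Mathlib
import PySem

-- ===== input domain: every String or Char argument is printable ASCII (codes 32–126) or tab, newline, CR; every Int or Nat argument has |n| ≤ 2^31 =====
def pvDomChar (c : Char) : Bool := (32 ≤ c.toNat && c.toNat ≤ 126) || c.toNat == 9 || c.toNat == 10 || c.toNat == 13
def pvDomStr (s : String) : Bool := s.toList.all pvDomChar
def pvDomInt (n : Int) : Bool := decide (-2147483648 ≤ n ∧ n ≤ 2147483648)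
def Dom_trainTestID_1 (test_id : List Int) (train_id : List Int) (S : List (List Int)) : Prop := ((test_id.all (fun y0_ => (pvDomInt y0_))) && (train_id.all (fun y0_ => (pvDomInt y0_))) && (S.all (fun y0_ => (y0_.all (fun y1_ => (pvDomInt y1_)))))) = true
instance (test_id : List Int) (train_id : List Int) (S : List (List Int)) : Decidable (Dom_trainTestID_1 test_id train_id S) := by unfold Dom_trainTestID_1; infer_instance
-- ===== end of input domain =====

-- B replaces A's per-id scan over all buckets by a one-pass precomputed dictionary of each
-- element's first and second distinct bucket index, assigning every id by O(1) lookups (objective: faster).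


-- ===== PORT A =====
-- inner `for j in range(size_)` loop of A, with its two early `break`s folded into the returns
def pvInnerA (t r : Int) (S : List (List Int)) (js : List Nat)
    (St Sr : List (List Int)) (c1 c2 : Bool) :
    List (List Int) × List (List Int) × Bool × Bool :=
  match js with
  | [] => (St, Sr, c1, c2)
  | j :: rest =>
    if c1 && (S.getD j []).contains t then
      let St' := St.set j (St.getD j [] ++ [t])
      if c2 then pvInnerA t r S rest St' Sr false c2 else (St', Sr, false, c2)
    else if c2 && (S.getD j []).contains r then
      let Sr' := Sr.set j (Sr.getD j [] ++ [r])
      if c1 then pvInnerA t r S rest St Sr' c1 false else (St, Sr', c1, false)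
    else
      if !(c1 || c2) then (St, Sr, c1, c2) else pvInnerA t r S rest St Sr c1 c2

def trainTestID_1 (test_id : List Int) (train_id : List Int) (S : List (List Int)) : List (List Int) × List (List Int) × List Int × List Int :=
  let size_ := S.length
  let S_test : List (List Int) := (List.range size_).map (fun _ => [])
  let S_train : List (List Int) := (List.range size_).map (fun _ => [])
  let size1 := test_id.length
  let size2 := train_id.length
  let size3 := max size1 size2
  let res := (List.range size3).foldl
    (fun (st : List (List Int) × List (List Int) × List Int × List Int) i =>
      let (St, Sr, cT, cR) := st
      let c1 := decide (i < size1)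
      let c2 := decide (i < size2)
      let (St', Sr', c1', c2') := pvInnerA (test_id.getD i 0) (train_id.getD i 0) S (List.range size_) St Sr c1 c2
      let cT' := if c1' then cT ++ [test_id.getD i 0] else cT
      let cR' := if c2' then cR ++ [train_id.getD i 0] else cR
      (St', Sr', cT', cR'))
    (S_test, S_train, ([] : List Int), ([] : List Int))
  (res.2.1, res.1, res.2.2.2, res.2.2.1)

-- ===== PORT B =====
-- helper: one element of B's `for j, bucket in enumerate(S): for x in bucket:` dict-building pass
def pvStepB (j : Nat) (fs : PySem.Dict Int Nat × PySem.Dict Int Nat) (x : Int) :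
    PySem.Dict Int Nat × PySem.Dict Int Nat :=
  match fs.1.get? x with
  | none => (fs.1.insert x j, fs.2)
  | some j0 => if j0 ≠ j ∧ fs.2.get? x = none then (fs.1, fs.2.insert x j) else fs

def pvBuildB (S : List (List Int)) (j : Nat) (f s : PySem.Dict Int Nat) :
    PySem.Dict Int Nat × PySem.Dict Int Nat :=
  match S with
  | [] => (f, s)
  | b :: rest =>
    let fs := b.foldl (pvStepB j) (f, s)
    pvBuildB rest (j + 1) fs.1 fs.2

def trainTestID_1_alt (test_id : List Int) (train_id : List Int) (S : List (List Int)) : List (List Int) × List (List Int) × List Int × List Int :=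
  let fs := pvBuildB S 0 PySem.Dict.empty PySem.Dict.empty
  let first := fs.1
  let second := fs.2
  let n1 := test_id.length
  let n2 := train_id.length
  let res := (List.range (max n1 n2)).foldl
    (fun (st : List (List Int) × List (List Int) × List Int × List Int) i =>
      let (St, Sr, cT, cR) := st
      let (jt, St, cT) :=
        if i < n1 then
          let t := test_id.getD i 0
          match first.get? t with
          | none => ((none : Option Nat), St, cT ++ [t])
          | some j => (some j, St.set j (St.getD j [] ++ [t]), cT)
        else (none, St, cT)
      let (Sr, cR) :=
        if i < n2 then
          let r := train_id.getD i 0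
          let jr := first.get? r
          let jr := if jr.isSome && jr == jt then second.get? r else jr
          match jr with
          | none => (Sr, cR ++ [r])
          | some j => (Sr.set j (Sr.getD j [] ++ [r]), cR)
        else (Sr, cR)
      (St, Sr, cT, cR))
    ((List.range S.length).map (fun _ => []), (List.range S.length).map (fun _ => []), [], [])
  (res.2.1, res.1, res.2.2.2, res.2.2.1)


-- ===== PRECONDITION & SPEC =====
def Spec_trainTestID_1 (test_id : List Int) (train_id : List Int) (S : List (List Int)) (out : List (List Int) × List (List Int) × List Int × List Int) : Prop := out = trainTestID_1_alt test_id train_id S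
instance (test_id : List Int) (train_id : List Int) (S : List (List Int)) (out : List (List Int) × List (List Int) × List Int × List Int) : Decidable (Spec_trainTestID_1 test_id train_id S out) := by unfold Spec_trainTestID_1; infer_instance

-- ===== CLAIM (what is proved, stated in full; the proofs are below) =====
def Claim_equal_trainTestID_1 : Prop := ∀ (test_id : List Int) (train_id : List Int) (S : List (List Int)), Dom_trainTestID_1 test_id train_id S → Spec_trainTestID_1 test_id train_id S (trainTestID_1 test_id train_id S)

-- ===== LEMMAS AND PROOFS =====
-- `pvOcc S j x` = the increasing list of bucket indices (counted from j) whose bucket contains x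

def pvOcc (S : List (List Int)) (j : Nat) (x : Int) : List Nat :=
  match S with
  | [] => []
  | b :: rest => (if b.contains x then [j] else []) ++ pvOcc rest (j + 1) x

def pvUpd (X : List (List Int)) (o : Option Nat) (v : Int) : List (List Int) :=
  match o with
  | none => X
  | some j => X.set j (X.getD j [] ++ [v])

theorem pvOcc_lb : ∀ (S : List (List Int)) (j : Nat) (x : Int), ∀ k ∈ pvOcc S j x, j ≤ k := by
  intro S
  induction S with
  | nil => simp [pvOcc]
  | cons b rest ih =>
    intro j x k hk
    simp only [pvOcc, List.mem_append] at hk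
    rcases hk with hk | hk
    · split at hk <;> simp_all
    · have := ih (j+1) x k hk; omega

theorem pvOcc_pairwise : ∀ (S : List (List Int)) (j : Nat) (x : Int), (pvOcc S j x).Pairwise (· < ·) := by
  intro S
  induction S with
  | nil => simp [pvOcc]
  | cons b rest ih =>
    intro j x
    simp only [pvOcc]
    rw [List.pairwise_append]
    refine ⟨by split <;> simp, ih (j+1) x, ?_⟩
    intro a ha b' hb'
    have hb2 := pvOcc_lb rest (j+1) x b' hb'
    split at ha <;> simp_all

theorem pvOcc_nodup (S : List (List Int)) (j : Nat) (x : Int) : (pvOcc S j x).Nodup :=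
  (pvOcc_pairwise S j x).imp (fun h => Nat.ne_of_lt h)

theorem pvOcc_succ : ∀ (S : List (List Int)) (j : Nat) (x : Int),
    pvOcc S (j + 1) x = (pvOcc S j x).map Nat.succ := by
  intro S
  induction S with
  | nil => simp [pvOcc]
  | cons b rest ih =>
    intro j x
    simp only [pvOcc, List.map_append, ih (j+1) x]
    congr 1
    split <;> simp [Nat.succ_eq_add_one]

theorem pv_findA_gen (S : List (List Int)) (r : Int) (q : Nat → Bool) :
    (List.range S.length).find? (fun j => (S.getD j []).contains r && q j)
      = ((pvOcc S 0 r).filter q).head? := by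
  induction S generalizing q with
  | nil => simp [pvOcc]
  | cons b rest ih =>
    rw [List.length_cons, List.range_succ_eq_map, List.find?_cons, List.find?_map]
    simp only [pvOcc, pvOcc_succ rest 0 r, List.filter_append, List.filter_map]
    by_cases hb : r ∈ b
    · by_cases hq : q 0
      · simp [hb, hq]
      · simp only [List.getD_cons_zero, show b.contains r = true by simpa using hb,
          Bool.true_and, hq, Bool.and_false]
        rw [show (fun j => (((b :: rest).getD j []).contains r && q j)) ∘ Nat.succ
              = fun j => ((rest.getD j []).contains r && (q ∘ Nat.succ) j) from rfl]
        rw [ih (q ∘ Nat.succ)]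
        simp [hb, hq, List.head?_map, Function.comp]
    · simp only [List.getD_cons_zero, show b.contains r = false by simpa using hb,
        Bool.false_and]
      rw [show (fun j => (((b :: rest).getD j []).contains r && q j)) ∘ Nat.succ
            = fun j => ((rest.getD j []).contains r && (q ∘ Nat.succ) j) from rfl]
      rw [ih (q ∘ Nat.succ)]
      simp [hb, List.head?_map, Function.comp]

theorem pv_findA (S : List (List Int)) (t : Int) :
    (List.range S.length).find? (fun j => (S.getD j []).contains t) = (pvOcc S 0 t).head? := by
  have := pv_findA_gen S t (fun _ => true)
  simpa using this

theorem pv_findA_excl (S : List (List Int)) (r : Int) (jt : Option Nat) :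
    (List.range S.length).find? (fun j => (S.getD j []).contains r && !(jt == some j))
      = ((pvOcc S 0 r).filter (fun j => !(jt == some j))).head? :=
  pv_findA_gen S r _

theorem pv_head_filter_ne (L : List Nat) (hL : L.Nodup) (jt : Option Nat) :
    (L.filter (fun j => !(jt == some j))).head?
      = if L.head?.isSome && L.head? == jt then L[1]? else L.head? := by
  match L, jt with
  | [], _ => simp
  | a :: rest, none => simp
  | a :: rest, some j0 =>
    by_cases ha : a = j0
    · subst ha
      simp only [List.filter_cons, beq_iff_eq, Option.some.injEq]
      have hnotin : a ∉ rest := (List.nodup_cons.mp hL).1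
      simp only [show (!((some a : Option Nat) == some a)) = false by simp, if_false]
      match rest, hnotin with
      | [], _ => simp
      | c :: rest2, hn =>
        have hc : c ≠ a := by intro h; exact hn (h ▸ List.mem_cons_self)
        simp [List.filter_cons, hc.symm, Ne.symm]
    · simp [List.filter_cons, ha, Ne.symm ha]

theorem pv_find?_congr : ∀ (l : List Nat) (p q : Nat → Bool), (∀ a ∈ l, p a = q a) → l.find? p = l.find? q := by
  intro l p q h
  induction l with
  | nil => rfl
  | cons a rest ih =>
    rw [List.find?_cons, List.find?_cons, h a List.mem_cons_self,
      ih (fun a ha => h a (List.mem_cons_of_mem _ ha))]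

theorem pvInnerA_spec : ∀ (js : List Nat), js.Nodup → ∀ (t r : Int) (S : List (List Int))
    (St Sr : List (List Int)) (c1 c2 : Bool),
    pvInnerA t r S js St Sr c1 c2 =
      (let jt := if c1 then js.find? (fun j => (S.getD j []).contains t) else none
       let jr := if c2 then js.find? (fun j => (S.getD j []).contains r && !(jt == some j)) else none
       (pvUpd St jt t, pvUpd Sr jr r, c1 && jt.isNone, c2 && jr.isNone)) := by
  intro js
  induction js with
  | nil => intro _ t r S St Sr c1 c2; cases c1 <;> cases c2 <;> simp [pvInnerA, pvUpd]
  | cons j rest ih =>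
    intro hnd t r S St Sr c1 c2
    have hj : j ∉ rest := (List.nodup_cons.mp hnd).1
    have hnd' : rest.Nodup := (List.nodup_cons.mp hnd).2
    cases c1 <;> cases c2
    · -- c1 = false, c2 = false
      simp [pvInnerA, pvUpd]
    · -- c1 = false, c2 = true
      by_cases hcr : r ∈ S[j]?.getD []
      · simp [pvInnerA, hcr, List.find?_cons, pvUpd, ih hnd']
      · simp only [pvInnerA, Bool.false_and, if_false, Bool.true_and,
          show (S.getD j []).contains r = false by simpa [List.getD_eq_getElem?_getD] using hcr,
          Bool.false_or, Bool.not_true, ih hnd' t r S St Sr false true]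
        simp [List.find?_cons, hcr]
    · -- c1 = true, c2 = false
      by_cases hct : t ∈ S[j]?.getD []
      · simp [pvInnerA, hct, List.find?_cons, pvUpd]
      · simp only [pvInnerA, Bool.true_and,
          show (S.getD j []).contains t = false by simpa [List.getD_eq_getElem?_getD] using hct,
          if_false, Bool.false_and, Bool.or_false, Bool.not_true,
          ih hnd' t r S St Sr true false]
        simp [List.find?_cons, hct, pvUpd]
    · -- c1 = true, c2 = true
      by_cases hct : t ∈ S[j]?.getD []
      · -- test assigned at j; train continues on rest, j itself excluded
        simp only [pvInnerA, Bool.true_and,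
          show (S.getD j []).contains t = true by simpa [List.getD_eq_getElem?_getD] using hct, if_true,
          ih hnd' t r S (St.set j (St.getD j [] ++ [t])) Sr false true]
        have hcong : List.find? (fun j' => decide (r ∈ S[j']?.getD [])) rest
            = List.find? (fun j' => decide (r ∈ S[j']?.getD []) && !(j == j')) rest := by
          apply pv_find?_congr
          intro a ha
          have hne : a ≠ j := fun h => hj (h ▸ ha)
          simp [Ne.symm hne]
        simp [List.find?_cons, hct, pvUpd]
        rw [← hcong]
        simp
      · by_cases hcr : r ∈ S[j]?.getD []
        · -- train assigned at j (test still searching: j cannot be test's bucket)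
          simp only [pvInnerA, Bool.true_and,
            show (S.getD j []).contains t = false by simpa [List.getD_eq_getElem?_getD] using hct, if_false,
            show (S.getD j []).contains r = true by simpa [List.getD_eq_getElem?_getD] using hcr, if_true,
            ih hnd' t r S St (Sr.set j (Sr.getD j [] ++ [r])) true false]
          have hne' : (List.find? (fun j' => decide (t ∈ S[j']?.getD [])) rest == some j) = false := by
            rw [Bool.eq_false_iff]
            intro h
            exact hj (List.mem_of_find?_eq_some (beq_iff_eq.mp h))
          simp [List.find?_cons, pvUpd, hct, hcr, hne']
        · simp only [pvInnerA, Bool.true_and,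
            show (S.getD j []).contains t = false by simpa [List.getD_eq_getElem?_getD] using hct,
            show (S.getD j []).contains r = false by simpa [List.getD_eq_getElem?_getD] using hcr,
            if_false, Bool.or_self, Bool.not_true, ih hnd' t r S St Sr true true]
          simp [List.find?_cons, hct, hcr]

-- effect of one bucket on the occurrence lists
def pvQ (q : Int → List Nat) (b : List Int) (j : Nat) (x : Int) : List Nat :=
  if x ∈ b ∧ j ∉ q x then q x ++ [j] else q x

theorem pvQ_pairwise (q : Int → List Nat) (b : List Int) (j : Nat)
    (hp : ∀ x, (q x).Pairwise (· < ·)) (hb : ∀ x k, k ∈ q x → k ≤ j) :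
    ∀ x, (pvQ q b j x).Pairwise (· < ·) := by
  intro x
  unfold pvQ
  split
  · rename_i h
    rw [List.pairwise_append]
    refine ⟨hp x, by simp, ?_⟩
    intro a ha c hc
    simp only [List.mem_singleton] at hc
    have h1 := hb x a ha
    have h2 : a ≠ c := fun he => h.2 (hc ▸ he ▸ ha)
    omega
  · exact hp x

theorem pvQ_le (q : Int → List Nat) (b : List Int) (j : Nat)
    (hb : ∀ x k, k ∈ q x → k ≤ j) :
    ∀ x k, k ∈ pvQ q b j x → k ≤ j + 1 := by
  intro x k hk
  unfold pvQ at hk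
  split at hk
  · simp only [List.mem_append, List.mem_singleton] at hk
    rcases hk with hk | hk
    · have := hb x k hk; omega
    · omega
  · have := hb x k hk; omega

-- one element step of the dict-building pass

theorem pvStepB_spec (j : Nat) (f s : PySem.Dict Int Nat) (q : Int → List Nat) (y : Int)
    (hp : ∀ x, (q x).Pairwise (· < ·)) (hb : ∀ x k, k ∈ q x → k ≤ j)
    (hf : ∀ x, f.get? x = (q x)[0]?) (hs : ∀ x, s.get? x = (q x)[1]?) :
    (∀ x, (pvStepB j (f, s) y).1.get? x = ((fun x => if x = y ∧ j ∉ q x then q x ++ [j] else q x) x)[0]?) ∧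
    (∀ x, (pvStepB j (f, s) y).2.get? x = ((fun x => if x = y ∧ j ∉ q x then q x ++ [j] else q x) x)[1]?) := by
  have hfy := hf y
  match hqy : q y with
  | [] =>
    rw [hqy] at hfy
    simp only [List.getElem?_nil] at hfy
    simp only [pvStepB, hfy]
    constructor <;> intro x
    · rw [PySem.Dict.get?_insert]
      by_cases hx : x = y
      · rw [if_pos hx, hx, if_pos ⟨rfl, by simp [hqy]⟩, hqy]
        rfl
      · rw [if_neg hx, hf x, if_neg (fun h => hx h.1)]
    · by_cases hx : x = y
      · rw [hx, if_pos ⟨rfl, by simp [hqy]⟩, hqy, hs y, hqy]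
        rfl
      · rw [hs x, if_neg (fun h => hx h.1)]
  | j0 :: tail =>
    rw [hqy] at hfy
    simp only [List.getElem?_cons_zero] at hfy
    simp only [pvStepB, hfy]
    by_cases hcond : j0 ≠ j ∧ s.get? y = none
    · -- second distinct bucket recorded: q y must be exactly [j0]
      rw [if_pos hcond]
      have htail : tail = [] := by
        have h2 := hs y
        rw [hqy, hcond.2] at h2
        cases tail with
        | nil => rfl
        | cons a _ => simp at h2
      subst htail
      have hjq : j ∉ q y := by
        rw [hqy]
        simp [Ne.symm hcond.1]
      constructor <;> intro x
      · by_cases hx : x = y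
        · rw [hx, if_pos ⟨rfl, hjq⟩, hqy, hf y, hqy]
          rfl
        · rw [hf x, if_neg (fun h => hx h.1)]
      · rw [PySem.Dict.get?_insert]
        by_cases hx : x = y
        · rw [if_pos hx, hx, if_pos ⟨rfl, hjq⟩, hqy]
          rfl
        · rw [if_neg hx, hs x, if_neg (fun h => hx h.1)]
    · -- no change to either dict, and neither lookup moves
      rw [if_neg hcond]
      have hkeep : ((if (y : Int) = y ∧ j ∉ q y then q y ++ [j] else q y))[0]? = (q y)[0]?
          ∧ ((if (y : Int) = y ∧ j ∉ q y then q y ++ [j] else q y))[1]? = (q y)[1]? := by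
        by_cases hj : j ∈ q y
        · rw [if_neg (fun hh => hh.2 hj)]
          exact ⟨rfl, rfl⟩
        · rw [if_pos ⟨rfl, hj⟩]
          rcases Decidable.not_and_iff_not_or_not.mp hcond with hcase | hcase
          · exfalso
            apply hj
            rw [hqy]
            have hj0 : j0 = j := by omega
            rw [← hj0]
            exact List.mem_cons_self
          · have h2 := hs y
            rw [hqy] at h2
            cases tail with
            | nil => simp [h2] at hcase
            | cons a tl =>
              rw [hqy]
              exact ⟨by simp, by simp⟩
      constructor <;> intro x
      · by_cases hx : x = y
        · rw [hx, hf y, ← hkeep.1]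
        · rw [hf x, if_neg (fun h => hx h.1)]
      · by_cases hx : x = y
        · rw [hx, hs y, ← hkeep.2]
        · rw [hs x, if_neg (fun h => hx h.1)]

theorem pvInnerB_spec : ∀ (b : List Int) (j : Nat) (f s : PySem.Dict Int Nat) (q : Int → List Nat),
    (∀ x, (q x).Pairwise (· < ·)) → (∀ x k, k ∈ q x → k ≤ j) →
    (∀ x, f.get? x = (q x)[0]?) → (∀ x, s.get? x = (q x)[1]?) →
    (∀ x, (b.foldl (pvStepB j) (f, s)).1.get? x = (pvQ q b j x)[0]?) ∧
    (∀ x, (b.foldl (pvStepB j) (f, s)).2.get? x = (pvQ q b j x)[1]?) := by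
  intro b
  induction b with
  | nil =>
    intro j f s q hp hb hf hs
    constructor <;> intro x <;> simp [pvQ, hf, hs]
  | cons y b' ih =>
    intro j f s q hp hb hf hs
    rw [List.foldl_cons]
    set q1 : Int → List Nat := fun x => if x = y ∧ j ∉ q x then q x ++ [j] else q x with hq1def
    have hstep := pvStepB_spec j f s q y hp hb hf hs
    have hq1p : ∀ x, (q1 x).Pairwise (· < ·) := by
      intro x
      simp only [hq1def]
      split
      · rename_i h
        rw [List.pairwise_append]
        refine ⟨hp x, by simp, ?_⟩
        intro a ha c hc
        simp only [List.mem_singleton] at hc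
        have h1 := hb x a ha
        have h2 : a ≠ c := fun he => h.2 (hc ▸ he ▸ ha)
        omega
      · exact hp x
    have hq1b : ∀ x k, k ∈ q1 x → k ≤ j := by
      intro x k hk
      simp only [hq1def] at hk
      split at hk
      · simp only [List.mem_append, List.mem_singleton] at hk
        rcases hk with hk | hk
        · exact hb x k hk
        · omega
      · exact hb x k hk
    have hmain := ih j (pvStepB j (f, s) y).1 (pvStepB j (f, s) y).2 q1 hq1p hq1b hstep.1 hstep.2
    have hcomp : ∀ x, pvQ q1 b' j x = pvQ q (y :: b') j x := by
      intro x
      by_cases hx : x = y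
      · subst hx
        by_cases hj : j ∈ q x
        · have e1 : q1 x = q x := by simp only [hq1def]; rw [if_neg (fun h => h.2 hj)]
          simp only [pvQ, e1]
          rw [if_neg (fun h => h.2 hj), if_neg (fun h => h.2 hj)]
        · have e1 : q1 x = q x ++ [j] := by simp only [hq1def]; rw [if_pos ⟨by trivial, hj⟩]
          simp only [pvQ, e1]
          rw [if_neg (fun h => h.2 (by simp)), if_pos ⟨List.mem_cons_self, hj⟩]
      · have e1 : q1 x = q x := by simp only [hq1def]; rw [if_neg (fun h => hx h.1)]
        simp only [pvQ, e1]
        by_cases hmem : x ∈ b'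
        · by_cases hj : j ∈ q x
          · rw [if_neg (fun h => h.2 hj), if_neg (fun h => h.2 hj)]
          · rw [if_pos ⟨hmem, hj⟩, if_pos ⟨List.mem_cons_of_mem _ hmem, hj⟩]
        · rw [if_neg (fun h => hmem h.1),
            if_neg (fun h => (List.mem_cons.mp h.1).elim (fun h1 => hx h1) (fun h1 => hmem h1))]
    constructor <;> intro x
    · rw [(show (pvStepB j (f, s) y) = ((pvStepB j (f, s) y).1, (pvStepB j (f, s) y).2) from rfl)] at *
      rw [hmain.1 x, hcomp x]
    · rw [(show (pvStepB j (f, s) y) = ((pvStepB j (f, s) y).1, (pvStepB j (f, s) y).2) from rfl)] at *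
      rw [hmain.2 x, hcomp x]

theorem pvBuildB_inv : ∀ (S : List (List Int)) (j : Nat) (f s : PySem.Dict Int Nat) (q : Int → List Nat),
    (∀ x, (q x).Pairwise (· < ·)) → (∀ x k, k ∈ q x → k < j) →
    (∀ x, f.get? x = (q x)[0]?) → (∀ x, s.get? x = (q x)[1]?) →
    (∀ x, (pvBuildB S j f s).1.get? x = (q x ++ pvOcc S j x)[0]?) ∧
    (∀ x, (pvBuildB S j f s).2.get? x = (q x ++ pvOcc S j x)[1]?) := by
  intro S
  induction S with
  | nil =>
    intro j f s q hp hb hf hs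
    constructor <;> intro x <;> simp [pvBuildB, pvOcc, hf, hs]
  | cons b rest ih =>
    intro j f s q hp hb hf hs
    have hble : ∀ x k, k ∈ q x → k ≤ j := fun x k hk => Nat.le_of_lt (hb x k hk)
    have hinner := pvInnerB_spec b j f s q hp hble hf hs
    have hq'p := pvQ_pairwise q b j hp hble
    have hq'b : ∀ x k, k ∈ pvQ q b j x → k < j + 1 := by
      intro x k hk
      have := pvQ_le q b j hble x k hk
      unfold pvQ at hk
      split at hk
      · simp only [List.mem_append, List.mem_singleton] at hk
        rcases hk with hk | hk
        · have := hb x k hk; omega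
        · omega
      · have := hb x k hk; omega
    have hmain := ih (j + 1) _ _ (pvQ q b j) hq'p hq'b hinner.1 hinner.2
    have hsplit : ∀ x, pvQ q b j x ++ pvOcc rest (j + 1) x = q x ++ pvOcc (b :: rest) j x := by
      intro x
      have hj : j ∉ q x := fun hin => absurd (hb x j hin) (lt_irrefl j)
      simp only [pvOcc, pvQ]
      by_cases hxb : x ∈ b
      · rw [if_pos ⟨hxb, hj⟩, if_pos (by simpa using hxb)]
        simp
      · rw [if_neg (fun h => hxb h.1), if_neg (by simpa using hxb)]
        simp
    constructor <;> intro x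
    · rw [show pvBuildB (b :: rest) j f s = pvBuildB rest (j+1) (b.foldl (pvStepB j) (f,s)).1 (b.foldl (pvStepB j) (f,s)).2 from rfl]
      rw [hmain.1 x, hsplit x]
    · rw [show pvBuildB (b :: rest) j f s = pvBuildB rest (j+1) (b.foldl (pvStepB j) (f,s)).1 (b.foldl (pvStepB j) (f,s)).2 from rfl]
      rw [hmain.2 x, hsplit x]

theorem pvBuildB_spec (S : List (List Int)) (x : Int) :
    (pvBuildB S 0 PySem.Dict.empty PySem.Dict.empty).1.get? x = (pvOcc S 0 x)[0]? ∧
    (pvBuildB S 0 PySem.Dict.empty PySem.Dict.empty).2.get? x = (pvOcc S 0 x)[1]? := by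
  have h := pvBuildB_inv S 0 PySem.Dict.empty PySem.Dict.empty (fun _ => [])
    (fun _ => List.Pairwise.nil) (fun x k hk => absurd hk (List.not_mem_nil))
    (fun x => by simp [PySem.Dict.get?_empty]) (fun x => by simp [PySem.Dict.get?_empty])
  exact ⟨by simpa using h.1 x, by simpa using h.2 x⟩

def pvStepA (test_id train_id : List Int) (S : List (List Int))
    (st : List (List Int) × List (List Int) × List Int × List Int) (i : Nat) :
    List (List Int) × List (List Int) × List Int × List Int :=
  let (St, Sr, cT, cR) := st
  let c1 := decide (i < test_id.length)
  let c2 := decide (i < train_id.length)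
  let (St', Sr', c1', c2') := pvInnerA (test_id.getD i 0) (train_id.getD i 0) S (List.range S.length) St Sr c1 c2
  let cT' := if c1' then cT ++ [test_id.getD i 0] else cT
  let cR' := if c2' then cR ++ [train_id.getD i 0] else cR
  (St', Sr', cT', cR')

def pvStepB' (first second : PySem.Dict Int Nat) (test_id train_id : List Int)
    (st : List (List Int) × List (List Int) × List Int × List Int) (i : Nat) :
    List (List Int) × List (List Int) × List Int × List Int :=
  let (St, Sr, cT, cR) := st
  let (jt, St, cT) :=
    if i < test_id.length then
      let t := test_id.getD i 0
      match first.get? t with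
      | none => ((none : Option Nat), St, cT ++ [t])
      | some j => (some j, St.set j (St.getD j [] ++ [t]), cT)
    else (none, St, cT)
  let (Sr, cR) :=
    if i < train_id.length then
      let r := train_id.getD i 0
      let jr := first.get? r
      let jr := if jr.isSome && jr == jt then second.get? r else jr
      match jr with
      | none => (Sr, cR ++ [r])
      | some j => (Sr.set j (Sr.getD j [] ++ [r]), cR)
    else (Sr, cR)
  (St, Sr, cT, cR)

theorem pvA_eq (test_id train_id : List Int) (S : List (List Int)) :
    trainTestID_1 test_id train_id S =
      (let res := (List.range (max test_id.length train_id.length)).foldl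
          (pvStepA test_id train_id S)
          ((List.range S.length).map (fun _ => []), (List.range S.length).map (fun _ => []), [], [])
       (res.2.1, res.1, res.2.2.2, res.2.2.1)) := rfl

theorem pvB_eq (test_id train_id : List Int) (S : List (List Int)) :
    trainTestID_1_alt test_id train_id S =
      (let fs := pvBuildB S 0 PySem.Dict.empty PySem.Dict.empty
       let res := (List.range (max test_id.length train_id.length)).foldl
          (pvStepB' fs.1 fs.2 test_id train_id)
          ((List.range S.length).map (fun _ => []), (List.range S.length).map (fun _ => []), [], [])
       (res.2.1, res.1, res.2.2.2, res.2.2.1)) := rfl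

theorem pvStep_eq (test_id train_id : List Int) (S : List (List Int))
    (first second : PySem.Dict Int Nat)
    (hfirst : ∀ x, first.get? x = (pvOcc S 0 x)[0]?)
    (hsecond : ∀ x, second.get? x = (pvOcc S 0 x)[1]?)
    (st : List (List Int) × List (List Int) × List Int × List Int) (i : Nat) :
    pvStepA test_id train_id S st i = pvStepB' first second test_id train_id st i := by
  obtain ⟨St, Sr, cT, cR⟩ := st
  unfold pvStepA pvStepB'
  dsimp only
  rw [pvInnerA_spec (List.range S.length) (List.nodup_range) (test_id.getD i 0) (train_id.getD i 0) S St Sr _ _]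
  simp only [pv_findA, pv_findA_excl, hfirst, hsecond]
  rw [pv_head_filter_ne (pvOcc S 0 (train_id.getD i 0)) (pvOcc_nodup S 0 (train_id.getD i 0))]
  simp only [List.head?_eq_getElem?]
  by_cases h1 : i < test_id.length <;> by_cases h2 : i < train_id.length <;>
    simp only [h1, h2, decide_true, decide_false, if_true, if_false] <;>
    cases hFt : (pvOcc S 0 (test_id.getD i 0))[0]? <;>
    cases hFr : (pvOcc S 0 (train_id.getD i 0))[0]? <;>
    simp [pvUpd, hFt, hFr] <;>
    try (cases hFr2 : (pvOcc S 0 (train_id.getD i 0))[1]? <;> simp [pvUpd, hFr2])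
  all_goals (
    rename_i vt vr
    by_cases heq : vr = vt <;>
      simp only [heq, if_true, if_false] <;>
      (try cases hFr2 : (pvOcc S 0 (train_id[i]?.getD 0))[1]?) <;>
      simp [pvUpd, hFr2])

-- ===== VERDICT (by name: the statement is the Claim_ definition above) =====
theorem trainTestID_1_spec : Claim_equal_trainTestID_1 := by
  intro test_id train_id S _
  unfold Spec_trainTestID_1
  rw [pvA_eq, pvB_eq]
  have hb := pvBuildB_spec S
  have hstep : pvStepA test_id train_id S
      = pvStepB' (pvBuildB S 0 PySem.Dict.empty PySem.Dict.empty).1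
          (pvBuildB S 0 PySem.Dict.empty PySem.Dict.empty).2 test_id train_id :=
    funext fun st => funext fun i =>
      pvStep_eq test_id train_id S _ _ (fun x => (hb x).1) (fun x => (hb x).2) st i
  dsimp only
  rw [hstep]
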